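-- pv_equiv track=rewrite | github.com/sethct/daily_code_problems | 20240202_RunLengthDecoder.py | run_length_decode
-- ===== SOURCE A (Python) =====
-- def run_length_decode(s):
--     """
--     Decodes a run-length encoded string.
--     :param s: The run-length encoded string to be decoded.
--     :return: The decoded original string.
--     """
--     #| Initialise an empty list to store the decoded characters.
--     decoded = []
--     #| Initialise an empty string to build up the count.
--     count = ""
--
--     for char in s:
--         if char.isdigit():
--             #| If the character is a digit, add it to the count string.
--             count += char
--         else:
--             #| Repeat the character 'count' times and append to the list.
--             decoded.append(char * int(count))
--             #| Reset count for the next character.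
--             count = ""
--
--     #| Join the decoded parts into a single string and return it.
--     return ''.join(decoded)
-- ===== SOURCE B (Python) =====
-- def run_length_decode(s):
--     """
--     Decodes a run-length encoded string.
--     Tokenizer style: scan a maximal digit run, then the character it counts,
--     decode that token, and jump past it; trailing digits are ignored.
--     """
--     out = []
--     i, n = 0, len(s)
--     while i < n:
--         j = i
--         while j < n and s[j].isdigit():
--             j += 1
--         if j == n:
--             break
--         out.append(s[j] * int(s[i:j]))
--         i = j + 1
--     return ''.join(out)
-- ===== Notes on version B (the rewrite author's own statement) =====
-- stated objective: alternative
-- what changed: B replaces A's char-by-char accumulator (building up a count string and resetting it) with an index-based tokenizer that slices each maximal digit run and its following character as one token and decodes it directly.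
import Mathlib
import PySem

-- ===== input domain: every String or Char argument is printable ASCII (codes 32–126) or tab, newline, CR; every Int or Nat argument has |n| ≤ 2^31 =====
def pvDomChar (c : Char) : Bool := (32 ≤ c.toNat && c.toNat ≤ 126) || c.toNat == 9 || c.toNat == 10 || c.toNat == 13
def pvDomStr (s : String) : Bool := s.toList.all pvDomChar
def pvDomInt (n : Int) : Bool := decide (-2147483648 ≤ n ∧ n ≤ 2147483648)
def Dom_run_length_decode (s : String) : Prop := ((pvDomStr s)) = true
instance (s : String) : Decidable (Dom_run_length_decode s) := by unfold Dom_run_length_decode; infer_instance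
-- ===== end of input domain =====

-- B rewrites A's char-by-char count-accumulator loop as an index/slice tokenizer
-- over (digit-run, char) tokens; objective: alternative decomposition, same cost.

-- ===== PORT A =====
-- A's loop: state = (decoded parts, pending count string); int('') (ValueError) = none.
def pvRldA : List Char → List Char → List Char → Option (List Char)
  | [], decoded, _ => some decoded
  | c :: rest, decoded, count =>
    if PySem.Chars.isdigit c then
      pvRldA rest decoded (count ++ [c])
    else
      match PySem.Int.ofChars? count with
      | none => none
      | some n => pvRldA rest (decoded ++ List.replicate n.toNat c) []

def run_length_decode (s : String) : String :=
  match pvRldA s.toList [] [] with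
  | some l => String.ofList l
  | none => ""   -- unreachable under Pre_run_length_decode (A raises ValueError there)

-- ===== PORT B =====
-- B's inner while loop: split off the maximal leading digit run.
def pvSplitDigits : List Char → List Char × List Char
  | [] => ([], [])
  | c :: rest =>
    if PySem.Chars.isdigit c then
      let p := pvSplitDigits rest
      (c :: p.1, p.2)
    else ([], c :: rest)

theorem pvSplitDigits_snd_length : ∀ cs : List Char, (pvSplitDigits cs).2.length ≤ cs.length := by
  intro cs
  induction cs with
  | nil => simp [pvSplitDigits]
  | cons c rest ih =>
    simp only [pvSplitDigits]
    split
    · exact Nat.le_succ_of_le ih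
    · simp

-- B's outer while loop: decode one (digit-run, char) token, recurse past it.
def pvRldB (cs : List Char) : Option (List Char) :=
  match h : pvSplitDigits cs with
  | (_, []) => some []
  | (ds, c :: rest) =>
    match PySem.Int.ofChars? ds with
    | none => none
    | some n => (pvRldB rest).map (fun t => List.replicate n.toNat c ++ t)
termination_by cs.length
decreasing_by
  have := pvSplitDigits_snd_length cs
  rw [h] at this
  simp at this
  omega

def run_length_decode_alt (s : String) : String :=
  match pvRldB s.toList with
  | some l => String.ofList l
  | none => ""   -- unreachable under Pre_run_length_decode (B raises ValueError there)

-- ===== PRECONDITION & SPEC =====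
-- Pre_: every non-digit character is immediately preceded by a digit; elsewhere the
-- pending count is empty and both A and B hit int() of an empty count string and raise ValueError.
def Pre_run_length_decode (s : String) : Prop :=
  ∀ i ∈ List.range s.toList.length,
    PySem.Chars.isdigit (s.toList.getD i ' ') = false →
      1 ≤ i ∧ PySem.Chars.isdigit (s.toList.getD (i - 1) ' ') = true
instance (s : String) : Decidable (Pre_run_length_decode s) := by unfold Pre_run_length_decode; infer_instance

def pvWitness_run_length_decode : String := "3a12b"

def Spec_run_length_decode (s : String) (out : String) : Prop := out = run_length_decode_alt s
instance (s : String) (out : String) : Decidable (Spec_run_length_decode s out) := by unfold Spec_run_length_decode; infer_instance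

-- ===== CLAIM (what is proved, stated in full; the proofs are below) =====
def Claim_equal_run_length_decode : Prop := ∀ (s : String), Dom_run_length_decode s → Pre_run_length_decode s → Spec_run_length_decode s (run_length_decode s)

-- ===== LEMMAS AND PROOFS =====

theorem pvSplitDigits_all (count : List Char)
    (hc : ∀ d ∈ count, PySem.Chars.isdigit d = true) :
    pvSplitDigits count = (count, []) := by
  induction count with
  | nil => simp [pvSplitDigits]
  | cons d rest ih =>
    have hd := hc d (by simp)
    simp only [pvSplitDigits, hd, if_true]
    rw [ih (fun x hx => hc x (by simp [hx]))]

theorem pvSplitDigits_append (count : List Char) (c : Char) (rest : List Char)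
    (hc : ∀ d ∈ count, PySem.Chars.isdigit d = true)
    (hnc : PySem.Chars.isdigit c = false) :
    pvSplitDigits (count ++ c :: rest) = (count, c :: rest) := by
  induction count with
  | nil => simp [pvSplitDigits, hnc]
  | cons d tl ih =>
    have hd := hc d (by simp)
    simp only [List.cons_append, pvSplitDigits, hd, if_true]
    rw [ih (fun x hx => hc x (by simp [hx]))]

theorem pvRldA_eq_B : ∀ (cs decoded count : List Char),
    (∀ d ∈ count, PySem.Chars.isdigit d = true) →
    pvRldA cs decoded count = (pvRldB (count ++ cs)).map (fun t => decoded ++ t) := by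
  intro cs
  induction cs with
  | nil =>
    intro decoded count hc
    rw [pvRldB, List.append_nil]
    simp only [pvRldA]
    split
    · next ds heq =>
      rw [pvSplitDigits_all count hc] at heq
      simp
    · next ds c rest heq =>
      rw [pvSplitDigits_all count hc] at heq
      simp at heq
  | cons c rest ih =>
    intro decoded count hc
    by_cases hd : PySem.Chars.isdigit c = true
    · simp only [pvRldA, hd, if_true]
      have : count ++ c :: rest = (count ++ [c]) ++ rest := by simp
      rw [this]
      exact ih decoded (count ++ [c]) (by
        intro x hx
        rcases List.mem_append.mp hx with h | h
        · exact hc x h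
        · simp at h; subst h; exact hd)
    · have hnc : PySem.Chars.isdigit c = false := by
        cases h : PySem.Chars.isdigit c
        · rfl
        · exact absurd h hd
      simp only [pvRldA, hnc, Bool.false_eq_true, if_false]
      rw [pvRldB, pvSplitDigits_append count c rest hc hnc]
      cases hofs : PySem.Int.ofChars? count with
      | none => simp [hofs]
      | some n =>
        simp only [hofs]
        rw [ih (decoded ++ List.replicate n.toNat c) [] (by simp), List.nil_append]
        cases pvRldB rest <;> simp

-- ===== VERDICT (by name: the statement is the Claim_ definition above) =====
theorem run_length_decode_spec : Claim_equal_run_length_decode := by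
  intro s _ _
  unfold Spec_run_length_decode run_length_decode run_length_decode_alt
  have h := pvRldA_eq_B s.toList [] [] (by simp)
  rw [List.nil_append] at h
  rw [h]
  cases pvRldB s.toList <;> simp
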